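-- pv_equiv track=rewrite | github.com/Immunotools/immunotools | py/ig_evolution/mst_algorithms.py | _ComputeMaxDegreeForEachWeight
-- ===== SOURCE A (Python) =====
-- def _ComputeMaxDegreeForEachWeight(edge_dict, edge_degree_dict):
--     weight_max_degree_dict = dict()
--     for e in edge_dict:
--         w = edge_dict[e]
--         if w not in weight_max_degree_dict:
--             weight_max_degree_dict[w] = edge_degree_dict[e]
--         weight_max_degree_dict[w] = max(weight_max_degree_dict[w], edge_degree_dict[e])
--     return weight_max_degree_dict
-- ===== SOURCE B (Python) =====
-- def _ComputeMaxDegreeForEachWeight(edge_dict, edge_degree_dict):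
--     groups = dict()
--     for e in edge_dict:
--         groups.setdefault(edge_dict[e], []).append(edge_degree_dict[e])
--     return {w: max(degs) for w, degs in groups.items()}
-- ===== Notes on version B (the rewrite author's own statement) =====
-- stated objective: alternative
-- what changed: Replaces the fused scan that maintains a per-weight running maximum (with a conditional seed insert plus an unconditional max-update per edge) by a two-phase build-index-then-reduce computation: first group all degrees by weight into lists, then take max of each group in a comprehension.
import Mathlib
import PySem

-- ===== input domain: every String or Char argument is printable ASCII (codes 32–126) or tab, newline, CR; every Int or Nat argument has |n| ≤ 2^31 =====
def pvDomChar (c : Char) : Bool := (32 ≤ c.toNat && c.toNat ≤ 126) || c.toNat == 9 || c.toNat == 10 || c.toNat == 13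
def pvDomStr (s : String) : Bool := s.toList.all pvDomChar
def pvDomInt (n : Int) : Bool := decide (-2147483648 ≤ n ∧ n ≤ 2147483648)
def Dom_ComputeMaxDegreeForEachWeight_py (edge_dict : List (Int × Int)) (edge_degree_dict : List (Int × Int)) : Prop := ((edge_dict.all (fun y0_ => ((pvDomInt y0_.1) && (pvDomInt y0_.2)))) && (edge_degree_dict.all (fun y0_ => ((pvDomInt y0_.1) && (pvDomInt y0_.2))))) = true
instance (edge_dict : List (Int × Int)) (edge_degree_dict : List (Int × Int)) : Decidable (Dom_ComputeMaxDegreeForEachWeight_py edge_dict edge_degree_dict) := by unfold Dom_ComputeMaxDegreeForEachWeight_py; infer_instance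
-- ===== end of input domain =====

-- B replaces A's fused scan with a running per-weight maximum by a two-phase
-- group-degrees-by-weight-then-take-max computation (objective: alternative structure, same cost).

-- ===== PORT A =====
def ComputeMaxDegreeForEachWeight_py (edge_dict : List (Int × Int)) (edge_degree_dict : List (Int × Int)) : List (Int × Int) :=
  let ed := PySem.Dict.ofList edge_dict
  let edd := PySem.Dict.ofList edge_degree_dict
  -- weight_max_degree_dict = dict(); for e in edge_dict: …
  (ed.keys.foldl (fun acc e =>
      let w := ed.getD e 0                                   -- w = edge_dict[e]
      -- if w not in weight_max_degree_dict: weight_max_degree_dict[w] = edge_degree_dict[e]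
      let acc := if acc.contains w then acc else acc.insert w (edd.getD e 0)
      -- weight_max_degree_dict[w] = max(weight_max_degree_dict[w], edge_degree_dict[e])
      acc.insert w (max (acc.getD w 0) (edd.getD e 0)))
    (PySem.Dict.empty : PySem.Dict Int Int)).items

-- ===== PORT B =====
def ComputeMaxDegreeForEachWeight_py_alt (edge_dict : List (Int × Int)) (edge_degree_dict : List (Int × Int)) : List (Int × Int) :=
  let ed := PySem.Dict.ofList edge_dict
  let edd := PySem.Dict.ofList edge_degree_dict
  -- groups = {}; for e in edge_dict: groups.setdefault(edge_dict[e], []).append(edge_degree_dict[e])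
  let groups := ed.keys.foldl (fun g e => g.modify (ed.getD e 0) [] (fun l => l ++ [edd.getD e 0]))
    (PySem.Dict.empty : PySem.Dict Int (List Int))
  -- {w: max(degs) for w, degs in groups.items()}  (degs is never empty)
  groups.items.map (fun p => (p.1, (PySem.List.max? p.2 id).getD 0))

-- ===== PRECONDITION & SPEC =====
-- A raises KeyError on edge_degree_dict[e] when some key of edge_dict is missing from edge_degree_dict.
def Pre_ComputeMaxDegreeForEachWeight_py (edge_dict : List (Int × Int)) (edge_degree_dict : List (Int × Int)) : Prop :=
  ∀ p ∈ edge_dict, edge_degree_dict.any (fun q => q.1 == p.1) = true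
instance (edge_dict : List (Int × Int)) (edge_degree_dict : List (Int × Int)) : Decidable (Pre_ComputeMaxDegreeForEachWeight_py edge_dict edge_degree_dict) := by unfold Pre_ComputeMaxDegreeForEachWeight_py; infer_instance
def pvWitness_ComputeMaxDegreeForEachWeight_py : (List (Int × Int)) × (List (Int × Int)) := ([(1, 2), (3, 2), (4, 7)], [(1, 5), (3, 9), (4, 1)])

def Spec_ComputeMaxDegreeForEachWeight_py (edge_dict : List (Int × Int)) (edge_degree_dict : List (Int × Int)) (out : List (Int × Int)) : Prop := out = ComputeMaxDegreeForEachWeight_py_alt edge_dict edge_degree_dict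
instance (edge_dict : List (Int × Int)) (edge_degree_dict : List (Int × Int)) (out : List (Int × Int)) : Decidable (Spec_ComputeMaxDegreeForEachWeight_py edge_dict edge_degree_dict out) := by unfold Spec_ComputeMaxDegreeForEachWeight_py; infer_instance

-- ===== CLAIM (what is proved, stated in full; the proofs are below) =====
def Claim_equal_ComputeMaxDegreeForEachWeight_py : Prop := ∀ (edge_dict : List (Int × Int)) (edge_degree_dict : List (Int × Int)), Dom_ComputeMaxDegreeForEachWeight_py edge_dict edge_degree_dict → Pre_ComputeMaxDegreeForEachWeight_py edge_dict edge_degree_dict → Spec_ComputeMaxDegreeForEachWeight_py edge_dict edge_degree_dict (ComputeMaxDegreeForEachWeight_py edge_dict edge_degree_dict)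

-- ===== LEMMAS AND PROOFS =====

-- the value B's comprehension computes for one group
def pvMx (l : List Int) : Int := (PySem.List.max? l id).getD 0
-- the item-wise bridge between B's groups dict and A's running-max dict
def pvF : Int × List Int → Int × Int := fun p => (p.1, pvMx p.2)

lemma pvMx_append (l : List Int) (d : Int) (h : l ≠ []) : pvMx (l ++ [d]) = max (pvMx l) d := by
  obtain ⟨m, hm⟩ : ∃ m, PySem.List.max? l id = some m := by
    cases l with
    | nil => exact absurd rfl h
    | cons x xs =>
      simp only [PySem.List.max?, List.foldl_cons]
      induction xs generalizing x with
      | nil => exact ⟨x, rfl⟩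
      | cons y ys ih =>
        simp only [List.foldl_cons]
        by_cases hxy : (x : Int) < y
        · simpa [hxy] using ih y
        · simpa [hxy] using ih x
  simp only [pvMx, PySem.List.max?, List.foldl_append, List.foldl_cons, List.foldl_nil]
  simp only [PySem.List.max?] at hm
  rw [hm]
  by_cases hlt : (m : Int) < d <;> simp [hlt, max_def] <;> omega

-- how one insert changes the item list, depending on key membership
lemma pvInsert_items_mem {ν : Type} (d : PySem.Dict Int ν) (k : Int) (v : ν)
    (h : d.contains k = true) :
    (d.insert k v).items = d.items.map (fun p => if (p.1 == k) = true then (k, v) else p) := by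
  simp [PySem.Dict.insert, h]

lemma pvInsert_items_new {ν : Type} (d : PySem.Dict Int ν) (k : Int) (v : ν)
    (h : d.contains k = false) :
    (d.insert k v).items = d.items ++ [(k, v)] := by
  simp [PySem.Dict.insert, h]

-- one iteration of the two loops preserves the bridge (A's dict = pvF-image of B's groups)
lemma pvStep (g : PySem.Dict Int (List Int)) (a : PySem.Dict Int Int) (w d : Int)
    (h : a.items = g.items.map pvF) (hne : ∀ p ∈ g.items, p.2 ≠ []) :
    (let acc := if a.contains w then a else a.insert w d;
     acc.insert w (max (acc.getD w 0) d)).items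
      = (g.modify w [] (fun l => l ++ [d])).items.map pvF
    ∧ ∀ p ∈ (g.modify w [] (fun l => l ++ [d])).items, p.2 ≠ [] := by
  have hcont : a.contains w = g.contains w := by
    simp only [PySem.Dict.contains, h, List.any_map]
    rfl
  by_cases hc : g.contains w = true
  · -- w already present in both dicts: both updates rewrite the matching entries in place
    obtain ⟨q, hq, hqw⟩ : ∃ q ∈ g.items, (q.1 == w) = true := by
      simpa [PySem.Dict.contains, List.any_eq_true] using hc
    obtain ⟨q', hfind⟩ : ∃ q', g.items.find? (fun p => p.1 == w) = some q' := by
      cases hf : g.items.find? (fun p => p.1 == w) with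
      | none => exact absurd hqw (by simpa using List.find?_eq_none.mp hf q hq)
      | some v => exact ⟨v, rfl⟩
    have hq'mem : q' ∈ g.items := List.mem_of_find?_eq_some hfind
    have hq'ne : q'.2 ≠ [] := hne q' hq'mem
    have hgget : g.get? w = some q'.2 := by simp [PySem.Dict.get?, hfind]
    have haget : a.get? w = some (pvMx q'.2) := by
      simp only [PySem.Dict.get?, h, List.find?_map]
      have hpred : ((fun p : Int × Int => p.1 == w) ∘ pvF) = (fun p : Int × List Int => p.1 == w) := rfl
      rw [hpred, hfind]
      rfl
    have hacont : a.contains w = true := by rw [hcont]; exact hc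
    have hmod : (g.modify w [] (fun l => l ++ [d])).items
        = g.items.map (fun p => if (p.1 == w) = true then (w, q'.2 ++ [d]) else p) := by
      rw [PySem.Dict.modify, pvInsert_items_mem g w _ hc]
      simp [PySem.Dict.getD, hgget]
    constructor
    · simp only [hacont, if_true]
      rw [pvInsert_items_mem a w _ hacont, hmod]
      simp only [PySem.Dict.getD, haget, Option.getD_some]
      rw [h, List.map_map, List.map_map]
      apply List.map_congr_left
      intro p hp
      by_cases hpw : (p.1 == w) = true
      · simp only [Function.comp, pvF, hpw, if_true, pvMx_append q'.2 d hq'ne]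
      · simp only [Function.comp, pvF, hpw, Bool.false_eq_true, if_false]
    · intro p hp
      rw [hmod] at hp
      obtain ⟨q0, hq0, rfl⟩ := List.mem_map.mp hp
      by_cases hq0w : (q0.1 == w) = true
      · simp [hq0w]
      · simpa [hq0w] using hne q0 hq0
  · -- w is new in both dicts: both append a fresh entry
    have hcnot : g.contains w = false := by simpa using hc
    have hanot : a.contains w = false := by rw [hcont]; exact hcnot
    have hnoa : ∀ p ∈ a.items, (p.1 == w) = false := by
      intro p hp
      by_contra hne'
      have : a.contains w = true := by
        simp only [PySem.Dict.contains, List.any_eq_true]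
        exact ⟨p, hp, by simpa using hne'⟩
      rw [hanot] at this
      exact Bool.false_ne_true this
    have hgget : g.get? w = none := by
      simp only [PySem.Dict.get?]
      rw [List.find?_eq_none.mpr (by
        intro q0 hq0
        by_contra hne'
        exact hc (by simp only [PySem.Dict.contains, List.any_eq_true]
                     exact ⟨q0, hq0, by simpa using hne'⟩))]
      rfl
    have hins : (a.insert w d).items = a.items ++ [(w, d)] :=
      pvInsert_items_new a w d hanot
    have hmod : (g.modify w [] (fun l => l ++ [d])).items = g.items ++ [(w, [d])] := by
      rw [PySem.Dict.modify, pvInsert_items_new g w _ hcnot]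
      simp [PySem.Dict.getD, hgget]
    constructor
    · simp only [hanot, Bool.false_eq_true, if_false]
      have hcont2 : (a.insert w d).contains w = true := by
        simp [PySem.Dict.contains, hins]
      have hget2 : (a.insert w d).get? w = some d := by
        simp only [PySem.Dict.get?, hins, List.find?_append]
        rw [List.find?_eq_none.mpr (by intro p hp; simp [hnoa p hp])]
        simp
      rw [pvInsert_items_mem _ w _ hcont2, hins, hmod]
      simp only [PySem.Dict.getD, hget2, Option.getD_some]
      rw [List.map_append, List.map_append]
      congr 1
      · -- no key of a.items equals w, so the rewrite pass leaves them unchanged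
        rw [List.map_congr_left (fun p hp => by simp [hnoa p hp] : ∀ p ∈ a.items, _ = id p),
          List.map_id, h]
      · -- the fresh entries: (w, max d d) on A's side, pvF (w, [d]) = (w, d) on B's side
        simp [pvF, pvMx, PySem.List.max?]
    · intro p hp
      rw [hmod] at hp
      rcases List.mem_append.mp hp with hp | hp
      · exact hne p hp
      · rw [List.mem_singleton.mp hp]
        simp

-- the whole fold preserves the bridge
lemma pvLoop (ks : List Int) (step : Int → Int × Int)
    (g : PySem.Dict Int (List Int)) (a : PySem.Dict Int Int)
    (h : a.items = g.items.map pvF) (hne : ∀ p ∈ g.items, p.2 ≠ []) :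
    (ks.foldl (fun acc e =>
        let w := (step e).1
        let acc := if acc.contains w then acc else acc.insert w (step e).2
        acc.insert w (max (acc.getD w 0) (step e).2)) a).items
      = (ks.foldl (fun g e => g.modify (step e).1 [] (fun l => l ++ [(step e).2])) g).items.map pvF := by
  induction ks generalizing g a with
  | nil => simpa using h
  | cons e ks ih =>
    simp only [List.foldl_cons]
    obtain ⟨h1, h2⟩ := pvStep g a (step e).1 (step e).2 h hne
    exact ih _ _ h1 h2

-- ===== VERDICT (by name: the statement is the Claim_ definition above) =====
theorem ComputeMaxDegreeForEachWeight_py_spec : Claim_equal_ComputeMaxDegreeForEachWeight_py := by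
  intro edge_dict edge_degree_dict _ _
  unfold Spec_ComputeMaxDegreeForEachWeight_py
  unfold ComputeMaxDegreeForEachWeight_py ComputeMaxDegreeForEachWeight_py_alt
  simp only []
  rw [pvLoop _ (fun e => ((PySem.Dict.ofList edge_dict).getD e 0,
        (PySem.Dict.ofList edge_degree_dict).getD e 0)) PySem.Dict.empty PySem.Dict.empty rfl
        (by intro p hp; simp [PySem.Dict.empty] at hp)]
  rfl
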